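-- pv_equiv track=rewrite | github.com/sagmax/RPP | Lab1.py | change_mas
-- ===== SOURCE A (Python) =====
-- def change_mas(ar, id1, id2):   # функция для удаления необходимых элементов по условию
--     k = 0                       # переменная для подсчета кол-ва удалений элементов
--     for i in range(len(ar)):
--         if ((i - k) > (id1 - k) and (i - k) < (id2 - k)):
--             if ar[i - k] % 3 == 0:
--                 ar.pop(i - k)
--                 k = k + 1
--     return ar
-- ===== SOURCE B (Python) =====
-- def change_mas(ar, id1, id2):
--     # In-place two-pointer compaction: write cursor w, read cursor r, one tail truncation.
--     w = 0
--     for r in range(len(ar)):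
--         if not (id1 < r < id2 and ar[r] % 3 == 0):
--             ar[w] = ar[r]
--             w += 1
--     del ar[w:]
--     return ar
-- ===== Notes on version B (the rewrite author's own statement) =====
-- stated objective: alternative
-- what changed: Replaced the pop-per-deleted-element loop (each pop shifts the tail and a deletion counter re-aligns the index) by a one-pass two-pointer in-place compaction with a write cursor and a single tail truncation.
import Mathlib
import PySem

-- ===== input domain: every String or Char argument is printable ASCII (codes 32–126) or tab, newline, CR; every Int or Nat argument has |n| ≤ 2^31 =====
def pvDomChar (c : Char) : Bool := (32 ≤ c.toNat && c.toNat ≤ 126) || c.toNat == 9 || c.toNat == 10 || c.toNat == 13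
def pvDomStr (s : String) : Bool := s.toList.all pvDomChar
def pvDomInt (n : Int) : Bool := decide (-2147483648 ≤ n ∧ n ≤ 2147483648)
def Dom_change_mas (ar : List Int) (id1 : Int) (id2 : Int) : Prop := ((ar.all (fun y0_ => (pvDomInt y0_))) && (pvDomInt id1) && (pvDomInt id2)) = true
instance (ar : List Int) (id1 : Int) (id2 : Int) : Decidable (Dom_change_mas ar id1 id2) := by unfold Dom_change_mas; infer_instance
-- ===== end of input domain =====

-- B replaces A's pop-per-element loop (a deletion counter re-aligns the index after each pop)
-- by a two-pointer in-place compaction (write cursor + one tail truncation). Both Pythons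
-- mutate `ar` in place; the equivalence proved here is about the RETURN value.

-- ===== PORT A =====
-- one iteration of A's loop: state (current list, deletion count k), loop index i;
-- the reads st.1[i-k] and pop(i-k) are exact via pyGetD/pop? — the index is always in range,
-- so the totalising defaults (.getD st, default 0) are never used.
def change_mas_step (id1 id2 : Int) (st : List Int × Int) (i : Int) : List Int × Int :=
  if (i - st.2 > id1 - st.2) && (i - st.2 < id2 - st.2) then
    if PySem.Int.mod (PySem.List.pyGetD st.1 (i - st.2) 0) 3 == 0 then
      ((PySem.List.pop? st.1 (i - st.2)).map (fun p => (p.2, st.2 + 1))).getD st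
    else st
  else st

def change_mas (ar : List Int) (id1 : Int) (id2 : Int) : List Int :=
  ((PySem.List.pyRange 0 (ar.length : Int) 1).foldl (change_mas_step id1 id2) (ar, 0)).1

-- ===== PORT B =====
-- one iteration of B's loop: `kept` is the compacted prefix ar[0:w]; `ar[w] = ar[r]; w += 1`
-- is modelled by appending ar[r] to that prefix, and `del ar[w:]` by returning just the prefix.
def change_mas_keep (ar : List Int) (id1 id2 : Int) (kept : List Int) (r : Int) : List Int :=
  if !((id1 < r && r < id2) && (PySem.Int.mod (PySem.List.pyGetD ar r 0) 3 == 0)) then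
    kept ++ [PySem.List.pyGetD ar r 0]
  else kept

def change_mas_alt (ar : List Int) (id1 : Int) (id2 : Int) : List Int :=
  (PySem.List.pyRange 0 (ar.length : Int) 1).foldl (change_mas_keep ar id1 id2) []

-- ===== PRECONDITION & SPEC =====
def Spec_change_mas (ar : List Int) (id1 : Int) (id2 : Int) (out : List Int) : Prop := out = change_mas_alt ar id1 id2
instance (ar : List Int) (id1 : Int) (id2 : Int) (out : List Int) : Decidable (Spec_change_mas ar id1 id2 out) := by unfold Spec_change_mas; infer_instance

-- ===== CLAIM (what is proved, stated in full; the proofs are below) =====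
def Claim_equal_change_mas : Prop := ∀ (ar : List Int) (id1 : Int) (id2 : Int), Dom_change_mas ar id1 id2 → Spec_change_mas ar id1 id2 (change_mas ar id1 id2)

-- ===== LEMMAS AND PROOFS =====

-- invariant: after the first n iterations, A's state is (B's kept prefix ++ the untouched tail, n - |kept|)
lemma change_mas_inv (ar : List Int) (id1 id2 : Int) :
    ∀ n : Nat, n ≤ ar.length →
      (PySem.List.pyRange 0 (n : Int) 1).foldl (change_mas_step id1 id2) (ar, 0)
        = (((PySem.List.pyRange 0 (n : Int) 1).foldl (change_mas_keep ar id1 id2) []) ++ ar.drop n,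
           (n : Int) - ((PySem.List.pyRange 0 (n : Int) 1).foldl (change_mas_keep ar id1 id2) []).length) := by
  intro n
  induction n with
  | zero => intro _; simp [PySem.List.pyRange_one_eq_nil]
  | succ n ih =>
    intro hn
    have hn' : n ≤ ar.length := Nat.le_of_succ_le hn
    have hlt : n < ar.length := hn
    have hcast : ((n + 1 : Nat) : Int) = (n : Int) + 1 := by push_cast; ring
    rw [hcast, PySem.List.pyRange_one_succ_right (by positivity), List.foldl_append, List.foldl_append,
        ih hn']
    set B := (PySem.List.pyRange 0 (n : Int) 1).foldl (change_mas_keep ar id1 id2) [] with hB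
    have hdrop : ar.drop n = ar[n] :: ar.drop (n + 1) := List.drop_eq_getElem_cons hlt
    simp only [List.foldl_cons, List.foldl_nil]
    have hidx : (n : Int) - ((n : Int) - (B.length : Int)) = (B.length : Int) := by ring
    -- the two guards coincide: (i-k > id1-k && i-k < id2-k) = (id1 < i && i < id2)
    have hguard : (decide ((n : Int) - ((n : Int) - (B.length : Int)) > id1 - ((n : Int) - (B.length : Int)))
          && decide ((n : Int) - ((n : Int) - (B.length : Int)) < id2 - ((n : Int) - (B.length : Int))))
        = (decide (id1 < (n : Int)) && decide ((n : Int) < id2)) := by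
      congr 1 <;> (rw [decide_eq_decide]; omega)
    have hmid : PySem.List.pyGetD (B ++ ar[n] :: ar.drop (n + 1)) ((B.length : Int)) 0 = ar[n] := by
      rw [PySem.List.pyGetD_natCast]
      simp [List.getD_eq_getElem?_getD, List.getElem?_append_right (Nat.le_refl B.length)]
      simp [List.getElem?_eq_getElem hlt]
    have hpop : PySem.List.pop? (B ++ ar[n] :: ar.drop (n + 1)) ((B.length : Int))
        = some (ar[n], B ++ ar.drop (n + 1)) := by
      rw [PySem.List.pop?_natCast _ _ (by simp; omega)]
      rw [List.eraseIdx_append_of_length_le (Nat.le_refl B.length)]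
      simp [List.getElem_append_right (Nat.le_refl B.length)]
    have hgetD : PySem.List.pyGetD ar ((n : Int)) 0 = ar[n] := by
      rw [PySem.List.pyGetD_natCast]
      simp [List.getD_eq_getElem?_getD, List.getElem?_eq_getElem hlt]
    simp only [change_mas_step, change_mas_keep]
    rw [hdrop, hguard, hidx, hmid, hpop, hgetD]
    by_cases hb : (decide (id1 < (n : Int)) && decide ((n : Int) < id2)) = true
    · by_cases hd : (PySem.Int.mod ar[n] 3 == 0) = true
      · -- in range and divisible: A pops ar[n], B does not keep it
        simp only [hb, hd, Bool.true_and, Bool.not_true, if_true, if_false,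
          Option.map_some, Option.getD_some, Prod.mk.injEq]
        first
        | exact ⟨by simp, by push_cast; ring⟩
        | (push_cast; ring)
        | (simp; push_cast; ring)
      · -- in range, not divisible: both keep ar[n]
        simp only [Bool.not_eq_true] at hd
        simp only [hb, hd, Bool.true_and, Bool.not_false, if_true, if_false, Prod.mk.injEq]
        simp only [List.append_assoc, List.singleton_append, List.length_append,
          List.length_cons, List.length_nil, Prod.mk.injEq]
        first
        | (refine ⟨rfl, ?_⟩; push_cast; ring)
        | (push_cast; ring)
        | rfl
    · -- out of range: both keep ar[n]
      simp only [Bool.not_eq_true] at hb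
      simp only [hb, Bool.false_and, Bool.not_false, if_true, if_false, Prod.mk.injEq]
      simp only [List.append_assoc, List.singleton_append, List.length_append,
        List.length_cons, List.length_nil, Prod.mk.injEq]
      first
      | (refine ⟨rfl, ?_⟩; push_cast; ring)
      | (push_cast; ring)
      | rfl

-- ===== VERDICT (by name: the statement is the Claim_ definition above) =====
theorem change_mas_spec : Claim_equal_change_mas := by
  intro ar id1 id2 _
  unfold Spec_change_mas change_mas change_mas_alt
  rw [change_mas_inv ar id1 id2 ar.length (Nat.le_refl _)]
  simp
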